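-- pv_equiv track=rewrite | github.com/CodeGuruNick/ConnectFour | bot.py | board_converter2
-- ===== SOURCE A (Python) =====
-- def board_converter2(in_board):
--     out_board, player1 = 0, 0
--     counter = [0 for i in range(7)]
--     for move in in_board:
--         move = int(move)
--         out_board += 1 << move + 7* counter[move]
--         if sum(counter) % 2 == 1:
--             player1 += 1 << move + 7* counter[move]
--         counter[move] += 1
--     player2 = player1 ^ out_board
--     return player1, player2
-- ===== SOURCE B (Python) =====
-- def board_converter2(in_board):
--     heights = [0] * 7
--     bits = []
--     out_board = 0
--     for move in in_board:
--         bit = 1 << (move + 7 * heights[move])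
--         bits.append(bit)
--         out_board |= bit
--         heights[move] += 1
--     player1 = 0
--     for bit in bits[1::2]:
--         player1 |= bit
--     return player1, out_board ^ player1
-- ===== Notes on version B (the rewrite author's own statement) =====
-- stated objective: alternative
-- what changed: One pass builds the per-move bit list from a heights array and ORs it into the occupancy board; a separate second pass ORs the bits at odd indices (bits[1::2]) into player1 and derives player2 as out_board ^ player1, replacing A's in-loop sum(counter)-parity branch and its repeated O(7) sum() per move.
-- outside the precondition, e.g. on board_converter2([6, -1]): A returns (64, 192), B returns (64, 0)
import Mathlib
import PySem

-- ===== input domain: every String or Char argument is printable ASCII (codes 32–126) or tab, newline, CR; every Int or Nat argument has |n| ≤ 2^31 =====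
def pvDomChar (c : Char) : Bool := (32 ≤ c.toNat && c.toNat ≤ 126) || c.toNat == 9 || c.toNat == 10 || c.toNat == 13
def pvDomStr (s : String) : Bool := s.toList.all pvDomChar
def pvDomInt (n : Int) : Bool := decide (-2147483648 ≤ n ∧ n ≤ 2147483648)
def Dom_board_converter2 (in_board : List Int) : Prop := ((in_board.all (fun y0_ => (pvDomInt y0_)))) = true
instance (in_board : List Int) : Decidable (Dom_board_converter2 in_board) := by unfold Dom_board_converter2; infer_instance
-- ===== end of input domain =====

-- B separates A's single parity-branching loop into a bit-list pass (heights array, OR-accumulated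
-- occupancy) and a second pass ORing the odd-indexed bits (bits[1::2]) into player1, with
-- player2 = out_board ^ player1; objective: alternative decomposition, same cost.


-- ===== PORT A =====
-- shared primitive of both Pythons: 'l[i] += 1' (negative index from the end; no-op where Python raises IndexError)
def pyIncrAt (l : List Int) (i : Int) : List Int :=
  match PySem.List.pyGet? l i with
  | some v => l.set (if i < 0 then i + l.length else i).toNat (v + 1)
  | none => l

def board_converter2_loop : List Int → Int × Int × List Int → Int × Int × List Int
  | [], st => st
  | move :: rest, (out_board, player1, counter) =>
    -- 1 << (move + 7*counter[move]); the shift is exact via toNat for a nonnegative exponent (guaranteed by Pre_)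
    let bit : Int := (1 : Int) <<< (move + 7 * PySem.List.pyGetD counter move 0).toNat
    let out_board' := out_board + bit
    let player1' := if PySem.Int.mod counter.sum 2 == 1 then player1 + bit else player1
    board_converter2_loop rest (out_board', player1', pyIncrAt counter move)

def board_converter2 (in_board : List Int) : Int × Int :=
  let st := board_converter2_loop in_board (0, 0, List.replicate 7 0)
  (st.2.1, PySem.Int.bxor st.2.1 st.1)

-- ===== PORT B =====
def bc2_firstPass : List Int → List Int × Int × List Int → List Int × Int × List Int
  | [], st => st
  | move :: rest, (bits, out_board, heights) =>
    let bit : Int := (1 : Int) <<< (move + 7 * PySem.List.pyGetD heights move 0).toNat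
    bc2_firstPass rest (bits ++ [bit], PySem.Int.bor out_board bit, pyIncrAt heights move)

-- bits[1::2]: hand port of a step-2 slice, exact for start 1, step 2, no stop
def bc2_oddSlice : List Int → List Int
  | [] => []
  | [_] => []
  | _ :: x :: rest => x :: bc2_oddSlice rest

def bc2_orFold : List Int → Int → Int
  | [], acc => acc
  | b :: bs, acc => bc2_orFold bs (PySem.Int.bor acc b)

def board_converter2_alt (in_board : List Int) : Int × Int :=
  let st := bc2_firstPass in_board ([], 0, List.replicate 7 0)
  let player1 := bc2_orFold (bc2_oddSlice st.1) 0
  (player1, PySem.Int.bxor st.2.1 player1)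

-- ===== PRECONDITION & SPEC =====
-- Pre_ keeps the natural Connect-Four columns 0..6. Outside them A raises (IndexError for
-- moves < -7 or > 6, ValueError for a negative shift) except on some negative moves where
-- Python's negative-index wraparound lets A return a board that double-counts an already
-- occupied cell — an accident of list indexing no caller of the bot hits.
def Pre_board_converter2 (in_board : List Int) : Prop := ∀ m ∈ in_board, 0 ≤ m ∧ m < 7
instance (in_board : List Int) : Decidable (Pre_board_converter2 in_board) := by unfold Pre_board_converter2; infer_instance
def pvWitness_board_converter2 : List Int := [3, 3, 0, 6]

def Spec_board_converter2 (in_board : List Int) (out : Int × Int) : Prop := out = board_converter2_alt in_board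
instance (in_board : List Int) (out : Int × Int) : Decidable (Spec_board_converter2 in_board out) := by unfold Spec_board_converter2; infer_instance

-- ===== CLAIM (what is proved, stated in full; the proofs are below) =====
def Claim_equal_board_converter2 : Prop := ∀ (in_board : List Int), Dom_board_converter2 in_board → Pre_board_converter2 in_board → Spec_board_converter2 in_board (board_converter2 in_board)

-- ===== LEMMAS AND PROOFS =====

-- Nat-level bit machinery
theorem pv_or_eq_add_of_and_eq_zero : ∀ a b : Nat, a &&& b = 0 → a ||| b = a + b := by
  intro a
  induction a using Nat.div2Induction with
  | ind a ih =>
    intro b h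
    rcases Nat.eq_zero_or_pos a with rfl | ha
    · simp
    have hd : a / 2 &&& b / 2 = 0 := by rw [← Nat.and_div_two, h]
    have h2 : a / 2 ||| b / 2 = a / 2 + b / 2 := ih ha _ hd
    have hx : (a ||| b) / 2 = a / 2 + b / 2 := by rw [Nat.or_div_two, h2]
    have hm : ¬ (a % 2 = 1 ∧ b % 2 = 1) := by
      intro hc
      have := Nat.and_mod_two_eq_one.mpr hc
      rw [h] at this; simp at this
    have hom : (a ||| b) % 2 = 1 ↔ a % 2 = 1 ∨ b % 2 = 1 := Nat.or_mod_two_eq_one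
    omega

def sumPows (l : List Nat) : Nat := (l.map (2 ^ ·)).sum

def natOrFold : List Nat → Nat → Nat
  | [], a => a
  | s :: t, a => natOrFold t (a ||| 2 ^ s)

theorem pv_natOrFold_eq : ∀ ss : List Nat, ∀ a : Nat, ss.Pairwise (· ≠ ·) →
    (∀ s ∈ ss, a.testBit s = false) → natOrFold ss a = a + sumPows ss := by
  intro ss
  induction ss with
  | nil => intro a _ _; simp [natOrFold, sumPows]
  | cons s t ih =>
    intro a hp hb
    rcases List.pairwise_cons.mp hp with ⟨hs, hpt⟩
    have ha : a &&& 2 ^ s = 0 := by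
      rw [Nat.and_two_pow, hb s (List.mem_cons_self)]; simp
    have hstep : a ||| 2 ^ s = a + 2 ^ s := pv_or_eq_add_of_and_eq_zero _ _ ha
    have hb' : ∀ u ∈ t, (a ||| 2 ^ s).testBit u = false := by
      intro u hu
      rw [Nat.testBit_lor, hb u (List.mem_cons_of_mem _ hu), Nat.testBit_two_pow]
      simp only [Bool.false_or, decide_eq_false_iff_not]
      exact hs u hu
    rw [natOrFold, ih _ hpt hb', hstep, sumPows]
    simp [sumPows]; ring

def powInt (s : Nat) : Int := ((2 ^ s : Nat) : Int)

theorem pv_orFold_map : ∀ (ss : List Nat) (a : Nat),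
    bc2_orFold (ss.map powInt) ((a : Nat) : Int) = ((natOrFold ss a : Nat) : Int) := by
  intro ss
  induction ss with
  | nil => intro a; simp [bc2_orFold, natOrFold]
  | cons s t ih =>
    intro a
    have : PySem.Int.bor ((a : Nat) : Int) (powInt s) = (((a ||| 2 ^ s : Nat) : Nat) : Int) :=
      PySem.Int.bor_natCast a (2 ^ s)
    simp only [List.map_cons, bc2_orFold, natOrFold, this, ih]

-- odd-position sublist and the alternating sum
def oddIdx : List Nat → List Nat
  | [] => []
  | [_] => []
  | _ :: x :: rest => x :: oddIdx rest

def oddSum : Bool → List Nat → Nat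
  | _, [] => 0
  | b, s :: t => (if b then 2 ^ s else 0) + oddSum (!b) t

theorem pv_oddSum_false : ∀ ss : List Nat, oddSum false ss = sumPows (oddIdx ss) := by
  intro ss
  induction ss using oddIdx.induct with
  | case1 => simp [oddSum, oddIdx, sumPows]
  | case2 x => simp [oddSum, oddIdx, sumPows]
  | case3 x y rest ih => simp [oddSum, oddIdx, sumPows, ih]

theorem pv_oddIdx_sublist : ∀ ss : List Nat, (oddIdx ss).Sublist ss := by
  intro ss
  induction ss using oddIdx.induct with
  | case1 => simp [oddIdx]
  | case2 x => simp [oddIdx]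
  | case3 x y rest ih => exact (ih.cons₂ y).cons x

theorem pv_oddSlice_map : ∀ ss : List Nat,
    bc2_oddSlice (ss.map powInt) = (oddIdx ss).map powInt := by
  intro ss
  induction ss using oddIdx.induct with
  | case1 => rfl
  | case2 x => rfl
  | case3 x y rest ih => simp [bc2_oddSlice, oddIdx, ih]

-- counters
def getc (c : List Int) (j : Nat) : Int := c.getD j 0

def Goodc (c : List Int) : Prop := c.length = 7 ∧ ∀ x ∈ c, 0 ≤ x

theorem pv_pyIncrAt_eq (c : List Int) (m : Int) (h0 : 0 ≤ m) (h7 : m < (c.length : Int)) :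
    pyIncrAt c m = c.set m.toNat (getc c m.toNat + 1) := by
  have hlt : m.toNat < c.length := by omega
  have hsome := PySem.List.pyGet?_eq_some_getElem c h0 h7
  rw [pyIncrAt, hsome]
  simp only [if_neg (by omega : ¬ m < 0)]
  unfold getc List.getD
  rw [List.getElem?_eq_getElem hlt]
  rfl

theorem pv_getc_set (c : List Int) (i : Nat) (v : Int) (j : Nat) (hi : i < c.length) :
    getc (c.set i v) j = if j = i then v else getc c j := by
  unfold getc
  by_cases h : j = i
  · subst h; simp [List.getD, hi]
  · simp [List.getD, List.getElem?_set_ne (by omega : i ≠ j), h]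

theorem pv_sum_set_succ : ∀ (c : List Int) (i : Nat), i < c.length →
    (c.set i (getc c i + 1)).sum = c.sum + 1 := by
  intro c
  induction c with
  | nil => intro i h; simp at h
  | cons x xs ih =>
    intro i h
    cases i with
    | zero => simp [getc, List.getD]; ring
    | succ n =>
      have hn : n < xs.length := by simpa using h
      simp only [List.set, List.sum_cons, getc, List.getD, List.getElem?_cons_succ]
      have := ih n hn
      simp only [getc, List.getD] at this
      rw [this]; ring

theorem pv_good_pyIncrAt (c : List Int) (m : Int) (hg : Goodc c) (h0 : 0 ≤ m) (h7 : m < 7) :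
    Goodc (pyIncrAt c m) := by
  rcases hg with ⟨hl, hnn⟩
  rw [pv_pyIncrAt_eq c m h0 (by omega)]
  refine ⟨by simpa using hl, ?_⟩
  intro x hx
  rcases List.mem_or_eq_of_mem_set hx with hx | rfl
  · exact hnn x hx
  · have : getc c m.toNat ∈ c := by
      unfold getc
      rw [List.getD_eq_getElem c 0 (by omega)]
      exact List.getElem_mem _
    have := hnn _ this
    omega

theorem pv_sum_pyIncrAt (c : List Int) (m : Int) (hg : Goodc c) (h0 : 0 ≤ m) (h7 : m < 7) :
    (pyIncrAt c m).sum = c.sum + 1 := by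
  rcases hg with ⟨hl, _⟩
  rw [pv_pyIncrAt_eq c m h0 (by omega)]
  exact pv_sum_set_succ c m.toNat (by omega)

theorem pv_getc_nonneg (c : List Int) (j : Nat) (hg : Goodc c) : 0 ≤ getc c j := by
  rcases hg with ⟨hl, hnn⟩
  by_cases h : j < c.length
  · refine hnn _ ?_
    unfold getc
    rw [List.getD_eq_getElem c 0 h]
    exact List.getElem_mem _
  · unfold getc
    rw [List.getD_eq_default _ _ (by omega)]

theorem pv_pyGetD_eq_getc (c : List Int) (m : Int) (h0 : 0 ≤ m) (h7 : m < (c.length : Int)) :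
    PySem.List.pyGetD c m 0 = getc c m.toNat := by
  rw [PySem.List.pyGetD_eq_getElem c 0 h0 h7]
  unfold getc
  rw [List.getD_eq_getElem c 0 (by omega)]

-- the shift list both loops generate
def shsL (counter : List Int) : List Int → List Nat
  | [] => []
  | m :: rest => (m + 7 * PySem.List.pyGetD counter m 0).toNat :: shsL (pyIncrAt counter m) rest

def cFin (c : List Int) : List Int → List Int
  | [] => c
  | m :: rest => cFin (pyIncrAt c m) rest

theorem pv_head_shift (c : List Int) (m : Int) (hg : Goodc c) (h0 : 0 ≤ m) (h7 : m < 7) :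
    (m + 7 * PySem.List.pyGetD c m 0).toNat % 7 = m.toNat ∧
    (((m + 7 * PySem.List.pyGetD c m 0).toNat / 7 : Nat) : Int) = getc c m.toNat := by
  have hlen : m < (c.length : Int) := by rw [hg.1]; exact_mod_cast h7
  rw [pv_pyGetD_eq_getc c m h0 hlen]
  have hγ : 0 ≤ getc c m.toNat := pv_getc_nonneg c m.toNat hg
  set γ := getc c m.toNat with hγdef
  have he : ((m + 7 * γ).toNat : Int) = m + 7 * γ := Int.toNat_of_nonneg (by omega)
  have he2 : (m + 7 * γ).toNat = m.toNat + 7 * γ.toNat := by omega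
  constructor
  · omega
  · have : (m + 7 * γ).toNat / 7 = γ.toNat := by omega
    rw [this]; omega

theorem pv_mem_shsL : ∀ (ms : List Int) (c : List Int), Goodc c →
    (∀ m ∈ ms, 0 ≤ m ∧ m < 7) →
    ∀ s ∈ shsL c ms, getc c (s % 7) ≤ ((s / 7 : Nat) : Int) := by
  intro ms
  induction ms with
  | nil => intro c _ _ s hs; simp [shsL] at hs
  | cons m rest ih =>
    intro c hg hpre s hs
    have hm := hpre m List.mem_cons_self
    rcases pv_head_shift c m hg hm.1 hm.2 with ⟨hmod, hdiv⟩
    rcases List.mem_cons.mp hs with rfl | hs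
    · rw [hmod, hdiv]
    · have hg' : Goodc (pyIncrAt c m) := pv_good_pyIncrAt c m hg hm.1 hm.2
      have := ih (pyIncrAt c m) hg' (fun x hx => hpre x (List.mem_cons_of_mem _ hx)) s hs
      have hset : getc (pyIncrAt c m) (s % 7) =
          if s % 7 = m.toNat then getc c m.toNat + 1 else getc c (s % 7) := by
        rw [pv_pyIncrAt_eq c m hm.1 (by rw [hg.1]; exact_mod_cast hm.2)]
        exact pv_getc_set c m.toNat _ _ (by have h1 := hg.1; have h2 := hm; omega)
      by_cases hcase : s % 7 = m.toNat
      · rw [if_pos hcase] at hset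
        rw [hcase] at this hset ⊢
        omega
      · rw [if_neg hcase] at hset
        omega

theorem pv_shsL_pairwise : ∀ (ms : List Int) (c : List Int), Goodc c →
    (∀ m ∈ ms, 0 ≤ m ∧ m < 7) → (shsL c ms).Pairwise (· ≠ ·) := by
  intro ms
  induction ms with
  | nil => intro c _ _; simp [shsL]
  | cons m rest ih =>
    intro c hg hpre
    have hm := hpre m List.mem_cons_self
    have hg' : Goodc (pyIncrAt c m) := pv_good_pyIncrAt c m hg hm.1 hm.2
    have hpre' : ∀ x ∈ rest, 0 ≤ x ∧ x < 7 := fun x hx => hpre x (List.mem_cons_of_mem _ hx)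
    rw [shsL, List.pairwise_cons]
    refine ⟨?_, ih _ hg' hpre'⟩
    intro s hs heq
    rcases pv_head_shift c m hg hm.1 hm.2 with ⟨hmod, hdiv⟩
    have hmem := pv_mem_shsL rest (pyIncrAt c m) hg' hpre' s hs
    have hset : getc (pyIncrAt c m) (s % 7) =
        if s % 7 = m.toNat then getc c m.toNat + 1 else getc c (s % 7) := by
      rw [pv_pyIncrAt_eq c m hm.1 (by rw [hg.1]; exact_mod_cast hm.2)]
      exact pv_getc_set c m.toNat _ _ (by have h1 := hg.1; have h2 := hm; omega)
    subst heq
    rw [hmod, if_pos rfl] at hset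
    rw [hmod, hset, hdiv] at hmem
    omega

-- parity flip for A's sum(counter) % 2 test
theorem pv_parity_flip (s : Int) :
    (PySem.Int.mod (s + 1) 2 == 1) = !(PySem.Int.mod s 2 == 1) := by
  rw [PySem.Int.mod_eq_emod_of_pos (by omega), PySem.Int.mod_eq_emod_of_pos (by omega)]
  rcases Int.emod_two_eq s with h | h
  · have h1 : (s + 1) % 2 = 1 := by omega
    simp [h, h1]
  · have h1 : (s + 1) % 2 = 0 := by omega
    simp [h, h1]

theorem pv_shiftOne (k : Nat) : (1 : Int) <<< k = ((2 ^ k : Nat) : Int) := by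
  rw [Int.shiftLeft_eq]; push_cast; ring

-- loop characterizations
theorem pv_aLoop_eq : ∀ (ms c : List Int) (out p1 : Int),
    (∀ m ∈ ms, 0 ≤ m ∧ m < 7) → Goodc c →
    board_converter2_loop ms (out, p1, c) =
      (out + ((sumPows (shsL c ms) : Nat) : Int),
       p1 + ((oddSum (PySem.Int.mod c.sum 2 == 1) (shsL c ms) : Nat) : Int),
       cFin c ms) := by
  intro ms
  induction ms with
  | nil => intro c out p1 _ _; simp [board_converter2_loop, shsL, sumPows, oddSum, cFin]
  | cons m rest ih =>
    intro c out p1 hpre hg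
    have hm := hpre m List.mem_cons_self
    have hg' : Goodc (pyIncrAt c m) := pv_good_pyIncrAt c m hg hm.1 hm.2
    have hpre' : ∀ x ∈ rest, 0 ≤ x ∧ x < 7 := fun x hx => hpre x (List.mem_cons_of_mem _ hx)
    rw [board_converter2_loop, ih (pyIncrAt c m) _ _ hpre' hg']
    rw [pv_sum_pyIncrAt c m hg hm.1 hm.2, pv_parity_flip]
    rw [shsL, cFin]
    set s := (m + 7 * PySem.List.pyGetD c m 0).toNat with hs
    set b := (PySem.Int.mod c.sum 2 == 1) with hb
    refine Prod.ext ?_ (Prod.ext ?_ rfl)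
    · simp only [pv_shiftOne, sumPows, List.map_cons, List.sum_cons]
      push_cast; ring
    · simp only [oddSum]
      cases hcb : b
      · rw [if_neg (by simp)]
        simp only [Bool.false_eq_true, if_false]
        push_cast; ring
      · rw [if_pos rfl]
        simp only [pv_shiftOne, if_true]
        push_cast; ring

theorem pv_bLoop_eq : ∀ (ms c bits : List Int) (out : Int),
    bc2_firstPass ms (bits, out, c) =
      (bits ++ (shsL c ms).map powInt,
       bc2_orFold ((shsL c ms).map powInt) out,
       cFin c ms) := by
  intro ms
  induction ms with
  | nil => intro c bits out; simp [bc2_firstPass, shsL, bc2_orFold, cFin]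
  | cons m rest ih =>
    intro c bits out
    rw [bc2_firstPass, ih]
    rw [shsL, cFin]
    simp only [List.map_cons, bc2_orFold, pv_shiftOne, powInt, List.append_assoc,
      List.singleton_append]

-- ===== VERDICT (by name: the statement is the Claim_ definition above) =====
theorem board_converter2_spec : Claim_equal_board_converter2 := by
  unfold Claim_equal_board_converter2
  intro ib _ hpre
  unfold Spec_board_converter2 board_converter2 board_converter2_alt
  have hg : Goodc (List.replicate 7 0) := ⟨by simp, by intro x hx; rw [List.eq_of_mem_replicate hx]⟩
  have hsum0 : (List.replicate 7 (0 : Int)).sum = 0 := by simp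
  rw [pv_aLoop_eq ib _ 0 0 hpre hg, pv_bLoop_eq]
  set ss := shsL (List.replicate 7 0) ib with hss
  have hdist : ss.Pairwise (· ≠ ·) := pv_shsL_pairwise ib _ hg hpre
  have hdistOdd : (oddIdx ss).Pairwise (· ≠ ·) := List.Pairwise.sublist (pv_oddIdx_sublist ss) hdist
  have hb0 : (PySem.Int.mod (List.replicate 7 (0:Int)).sum 2 == 1) = false := by
    rw [hsum0]; decide
  have hout : bc2_orFold (ss.map powInt) 0 = ((sumPows ss : Nat) : Int) := by
    have := pv_orFold_map ss 0
    simpa [pv_natOrFold_eq ss 0 hdist (fun s _ => Nat.zero_testBit s)] using this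
  have hp1 : bc2_orFold (bc2_oddSlice (ss.map powInt)) 0 = ((sumPows (oddIdx ss) : Nat) : Int) := by
    rw [pv_oddSlice_map ss]
    have := pv_orFold_map (oddIdx ss) 0
    simpa [pv_natOrFold_eq (oddIdx ss) 0 hdistOdd (fun s _ => Nat.zero_testBit s)] using this
  have hodd : oddSum false ss = sumPows (oddIdx ss) := pv_oddSum_false ss
  simp only [hb0, hout, hp1, hodd, List.nil_append, zero_add]
  rw [PySem.Int.bxor_comm]
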